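-- pv_equiv track=rewrite | github.com/northaxosky/HouseRules | tools/validate_house_rules_log.py | select_session
-- ===== SOURCE A (Python) =====
-- SESSION_MARKER = "House Rules loading"
--
-- def select_session(all_lines: list[str], latest: bool) -> list[tuple[int, str]]:
--     numbered = list(enumerate(all_lines, start=1))
--     if not latest:
--         return numbered
--     last_marker = -1
--     for i, line in numbered:
--         if SESSION_MARKER in line:
--             last_marker = i
--     if last_marker < 0:
--         return numbered
--     return [(i, l) for (i, l) in numbered if i >= last_marker]
-- ===== SOURCE B (Python) =====
-- SESSION_MARKER = "House Rules loading"
--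
-- def select_session(all_lines, latest):
--     numbered = list(enumerate(all_lines, start=1))
--     if not latest:
--         return numbered
--     for num, line in reversed(numbered):
--         if SESSION_MARKER in line:
--             return numbered[num - 1:]
--     return numbered
-- ===== Notes on version B (the rewrite author's own statement) =====
-- stated objective: alternative
-- what changed: Replaces the full forward scan recording the last marker plus a filter comprehension by a single early-exiting backward scan that returns the slice numbered[num-1:] at the first marker found from the end.
import Mathlib
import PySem

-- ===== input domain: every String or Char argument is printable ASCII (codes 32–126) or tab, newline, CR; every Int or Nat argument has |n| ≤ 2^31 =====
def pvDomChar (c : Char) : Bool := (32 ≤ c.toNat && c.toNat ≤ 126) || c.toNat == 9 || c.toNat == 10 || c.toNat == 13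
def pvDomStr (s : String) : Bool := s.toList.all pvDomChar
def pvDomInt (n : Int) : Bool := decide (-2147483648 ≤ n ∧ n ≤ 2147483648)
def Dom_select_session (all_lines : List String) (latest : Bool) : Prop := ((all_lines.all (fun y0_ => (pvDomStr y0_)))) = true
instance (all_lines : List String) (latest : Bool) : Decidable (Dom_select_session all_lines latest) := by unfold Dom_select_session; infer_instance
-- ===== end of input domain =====

-- B replaces A's full forward scan + filter comprehension by one backward scan
-- that stops at the first marker found from the end, then a slice (alternative decomposition).

def SESSION_MARKER : String := "House Rules loading"

-- ===== PORT A =====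
def select_session (all_lines : List String) (latest : Bool) : List (Int × String) :=
  let numbered := PySem.List.enumerate all_lines 1
  if !latest then numbered else
  let last_marker : Int :=
    numbered.foldl (fun acc p => if PySem.Str.isIn SESSION_MARKER p.2 then p.1 else acc) (-1)
  if last_marker < 0 then numbered
  else numbered.filter (fun p => decide (last_marker ≤ p.1))

-- ===== PORT B =====
-- the 'for … in reversed(numbered): if …: return' loop of Source B
def pvFindBack : List (Int × String) → Option Int
  | [] => none
  | p :: rest => if PySem.Str.isIn SESSION_MARKER p.2 then some p.1 else pvFindBack rest

def select_session_alt (all_lines : List String) (latest : Bool) : List (Int × String) :=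
  let numbered := PySem.List.enumerate all_lines 1
  if !latest then numbered else
  match pvFindBack numbered.reverse with
  | some num => PySem.List.slice numbered (some (num - 1)) none
  | none => numbered

-- ===== PRECONDITION & SPEC =====
def Spec_select_session (all_lines : List String) (latest : Bool) (out : List (Int × String)) : Prop := out = select_session_alt all_lines latest
instance (all_lines : List String) (latest : Bool) (out : List (Int × String)) : Decidable (Spec_select_session all_lines latest out) := by unfold Spec_select_session; infer_instance

-- ===== CLAIM (what is proved, stated in full; the proofs are below) =====
def Claim_equal_select_session : Prop := ∀ (all_lines : List String) (latest : Bool), Dom_select_session all_lines latest → Spec_select_session all_lines latest (select_session all_lines latest)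

-- ===== LEMMAS AND PROOFS =====

theorem pvFindBack_append (xs : List (Int × String)) (p : Int × String) :
    pvFindBack (xs ++ [p]) =
      (match pvFindBack xs with
       | some i => some i
       | none => if PySem.Str.isIn SESSION_MARKER p.2 then some p.1 else none) := by
  induction xs with
  | nil => simp [pvFindBack]
  | cons q xs ih =>
      simp only [List.cons_append, pvFindBack, ih]
      split_ifs <;> rfl

theorem foldl_eq_findBack (l : List (Int × String)) (a : Int) :
    l.foldl (fun acc p => if PySem.Str.isIn SESSION_MARKER p.2 then p.1 else acc) a
      = (pvFindBack l.reverse).getD a := by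
  induction l generalizing a with
  | nil => simp [pvFindBack]
  | cons p l ih =>
      simp only [List.foldl_cons, List.reverse_cons, pvFindBack_append, ih]
      cases h : pvFindBack l.reverse with
      | some i => rfl
      | none => split_ifs <;> rfl

theorem pvFindBack_mem {l : List (Int × String)} {i : Int}
    (h : pvFindBack l = some i) : ∃ p ∈ l, p.1 = i := by
  induction l with
  | nil => simp [pvFindBack] at h
  | cons p l ih =>
      simp only [pvFindBack] at h
      split_ifs at h with hm
      · exact ⟨p, List.mem_cons_self, Option.some_inj.mp h⟩
      · obtain ⟨q, hq, hq1⟩ := ih h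
        exact ⟨q, List.mem_cons_of_mem _ hq, hq1⟩

theorem filter_enumerate_eq_drop (ls : List String) (s : Int) (k : Nat) :
    (PySem.List.enumerate ls s).filter (fun p => decide (s + (k : Int) ≤ p.1))
      = (PySem.List.enumerate ls s).drop k := by
  induction ls generalizing s k with
  | nil => simp
  | cons x ls ih =>
      rw [PySem.List.enumerate_cons]
      cases k with
      | zero =>
          simp only [Nat.cast_zero, add_zero, List.drop_zero]
          rw [List.filter_eq_self]
          intro p hp
          rcases List.mem_cons.mp hp with h | h
          · subst h; simp
          · rcases (PySem.List.mem_enumerate_iff _ _ _).mp h with ⟨j, hj, rfl⟩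
            simp; omega
      | succ k =>
          have hhead : ¬ (s + ((k + 1 : Nat) : Int) ≤ s) := by push_cast; omega
          simp only [List.filter_cons, decide_eq_true_eq, hhead, if_false, List.drop_succ_cons]
          have : (fun p : Int × String => decide (s + ((k + 1 : Nat) : Int) ≤ p.1))
               = (fun p : Int × String => decide ((s + 1) + (k : Int) ≤ p.1)) := by
            funext p; rw [decide_eq_decide]; push_cast; omega
          rw [this, ih]

-- ===== VERDICT (by name: the statement is the Claim_ definition above) =====
theorem select_session_spec : Claim_equal_select_session := by
  intro all_lines latest _
  unfold Spec_select_session select_session select_session_alt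
  cases latest with
  | false => simp
  | true =>
      simp only [Bool.not_true, if_neg (by simp : ¬ (false = true))]
      rw [foldl_eq_findBack]
      cases h : pvFindBack (PySem.List.enumerate all_lines 1).reverse with
      | none => simp
      | some num =>
          obtain ⟨p, hp, hp1⟩ := pvFindBack_mem h
          rw [List.mem_reverse] at hp
          rcases (PySem.List.mem_enumerate_iff _ _ _).mp hp with ⟨k, hk, hpk⟩
          have hnum : num = 1 + (k : Int) := by rw [← hp1, hpk]
          subst hnum
          simp only [Option.getD_some]
          rw [if_neg (by omega : ¬ (1 + (k : Int) < 0))]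
          rw [PySem.List.slice_from _ (by omega : (0:Int) ≤ 1 + (k : Int) - 1)]
          have hnat : (1 + (k : Int) - 1).toNat = k := by omega
          rw [hnat]
          exact filter_enumerate_eq_drop all_lines 1 k
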